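-- pv_equiv track=rewrite | github.com/magdamalinowska29/RW_modelling | accuracy_plotting/comparing_with_robot_per_cond.py | count_rewards
-- ===== SOURCE A (Python) =====
-- def count_rewards(correct_ans, obs, trl_start):
--
--     rew_best=0
--     rew_mid=0
--     rew_worst=0
--
--     neg_best = 0
--     neg_mid = 0
--     neg_worst = 0
--
--
--
--     for trl in range(len(correct_ans)):
--
--         trl_obs=trl+block_start
--
--         if correct_ans[trl]==2:
--
--             if obs[trl_obs]==1:
--
--                 rew_best+=1
--             else:
--                 neg_best+=1
--
--         elif correct_ans[trl]==1:
--
--             if obs[trl_obs] == 1: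
--
--                 rew_mid += 1
--             else:
--                 neg_mid += 1
--
--         elif correct_ans[trl]==0:
--
--             if obs[trl_obs] == 1:
--
--                 rew_worst += 1
--             else:
--                 neg_worst += 1
--
--     return rew_best, rew_mid, rew_worst
--
-- block_start=0
-- ===== SOURCE B (Python) =====
-- block_start = 0
--
--
-- def count_rewards(correct_ans, obs, trl_start):
--     # Stage 1: collect the correct-answer category of every rewarded trial;
--     # stage 2: read off the three per-category totals by counting.
--     rewarded = [c for c, o in zip(correct_ans, obs[block_start:]) if o == 1]
--     return rewarded.count(2), rewarded.count(1), rewarded.count(0)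
-- ===== Notes on version B (the rewrite author's own statement) =====
-- stated objective: simpler
-- what changed: Replaces A's single-pass if/elif dispatch over six named counters by two stages: first build the list of correct-answer categories of rewarded trials (a zip+filter comprehension), then count occurrences of 2, 1 and 0 in it; the unused negative counters disappear and there is no branching on the category at all.
import Mathlib
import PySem

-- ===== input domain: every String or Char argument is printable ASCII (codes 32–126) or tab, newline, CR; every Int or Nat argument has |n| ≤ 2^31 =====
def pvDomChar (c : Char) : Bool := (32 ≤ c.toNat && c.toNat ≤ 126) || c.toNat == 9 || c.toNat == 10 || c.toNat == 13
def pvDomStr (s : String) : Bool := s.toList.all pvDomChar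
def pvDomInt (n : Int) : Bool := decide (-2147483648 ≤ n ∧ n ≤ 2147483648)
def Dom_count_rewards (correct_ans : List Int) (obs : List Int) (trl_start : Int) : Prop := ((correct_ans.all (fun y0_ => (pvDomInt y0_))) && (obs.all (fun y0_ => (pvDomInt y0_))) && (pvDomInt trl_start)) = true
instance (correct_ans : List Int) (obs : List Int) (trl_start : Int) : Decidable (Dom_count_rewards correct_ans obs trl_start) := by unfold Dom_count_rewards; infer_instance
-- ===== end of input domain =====

-- B replaces A's single-pass if/elif dispatch over six counters by two stages: collect the
-- categories of rewarded trials, then count 2/1/0 in that list (objective: simpler).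

-- module-level global used by both versions (its value at call time is 0)
def block_start : Int := 0

-- ===== PORT A =====
def count_rewards (correct_ans : List Int) (obs : List Int) (trl_start : Int) : Int × Int × Int :=
  let s :=
    (PySem.List.pyRange 0 (correct_ans.length : Int) 1).foldl
      (fun (st : (Int × Int × Int) × (Int × Int × Int)) trl =>
        let trl_obs := trl + block_start
        if PySem.List.pyGetD correct_ans trl 0 = 2 then
          if PySem.List.pyGetD obs trl_obs 0 = 1 then
            ((st.1.1 + 1, st.1.2.1, st.1.2.2), st.2)
          else
            (st.1, (st.2.1 + 1, st.2.2.1, st.2.2.2))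
        else if PySem.List.pyGetD correct_ans trl 0 = 1 then
          if PySem.List.pyGetD obs trl_obs 0 = 1 then
            ((st.1.1, st.1.2.1 + 1, st.1.2.2), st.2)
          else
            (st.1, (st.2.1, st.2.2.1 + 1, st.2.2.2))
        else if PySem.List.pyGetD correct_ans trl 0 = 0 then
          if PySem.List.pyGetD obs trl_obs 0 = 1 then
            ((st.1.1, st.1.2.1, st.1.2.2 + 1), st.2)
          else
            (st.1, (st.2.1, st.2.2.1, st.2.2.2 + 1))
        else st)
      ((0, 0, 0), (0, 0, 0))
  (s.1.1, s.1.2.1, s.1.2.2)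

-- ===== PORT B =====
def count_rewards_alt (correct_ans : List Int) (obs : List Int) (trl_start : Int) : Int × Int × Int :=
  let rewarded :=
    ((correct_ans.zip (PySem.List.slice obs (some block_start) none)).filter
        (fun p => p.2 == 1)).map Prod.fst
  ((PySem.List.count rewarded 2 : Int), (PySem.List.count rewarded 1 : Int),
    (PySem.List.count rewarded 0 : Int))

-- ===== PRECONDITION & SPEC =====
-- Pre_ excludes exactly the inputs where Python A raises IndexError: a trial whose
-- correct-answer category is in {0,1,2} but whose index is out of range for obs.
def Pre_count_rewards (correct_ans : List Int) (obs : List Int) (trl_start : Int) : Prop :=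
  ∀ i : Nat, i < correct_ans.length →
    (correct_ans.getD i 0 = 0 ∨ correct_ans.getD i 0 = 1 ∨ correct_ans.getD i 0 = 2) →
    i < obs.length
instance (correct_ans : List Int) (obs : List Int) (trl_start : Int) : Decidable (Pre_count_rewards correct_ans obs trl_start) := by unfold Pre_count_rewards; infer_instance

def pvWitness_count_rewards : List Int × List Int × Int := ([2, 1, 0, 5], [1, 1, 0, 1], 0)

def Spec_count_rewards (correct_ans : List Int) (obs : List Int) (trl_start : Int) (out : Int × Int × Int) : Prop := out = count_rewards_alt correct_ans obs trl_start
instance (correct_ans : List Int) (obs : List Int) (trl_start : Int) (out : Int × Int × Int) : Decidable (Spec_count_rewards correct_ans obs trl_start out) := by unfold Spec_count_rewards; infer_instance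

-- ===== CLAIM =====
def Claim_equal_count_rewards : Prop := ∀ (correct_ans : List Int) (obs : List Int) (trl_start : Int), Dom_count_rewards correct_ans obs trl_start → Pre_count_rewards correct_ans obs trl_start → Spec_count_rewards correct_ans obs trl_start (count_rewards correct_ans obs trl_start)

-- ===== LEMMAS AND PROOFS =====

-- the per-trial "category k and rewarded" test, read through total indexing with default 0
def catHit (correct_ans obs : List Int) (k : Int) (j : Nat) : Bool :=
  (correct_ans.getD j 0 == k) && (obs.getD j 0 == 1)

-- A's loop counts, for each category, the trials passing catHit.
theorem catHit_cat_true (ca obs : List Int) (j : Nat) (k : Int)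
    (hc : ca.getD j 0 = k) (ho : obs.getD j 0 = 1) : catHit ca obs k j = true := by
  unfold catHit; rw [hc, ho]; simp

theorem catHit_cat_false (ca obs : List Int) (j : Nat) (k : Int)
    (hc : ca.getD j 0 ≠ k) : catHit ca obs k j = false := by
  unfold catHit; rw [beq_eq_false_iff_ne.mpr hc, Bool.false_and]

theorem catHit_rew_false (ca obs : List Int) (j : Nat) (k : Int)
    (ho : obs.getD j 0 ≠ 1) : catHit ca obs k j = false := by
  unfold catHit; rw [beq_eq_false_iff_ne.mpr ho, Bool.and_false]

theorem foldA_counts (correct_ans obs : List Int) (L : List Nat) :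
    ∀ st : (Int × Int × Int) × (Int × Int × Int),
      (L.foldl
        (fun (st : (Int × Int × Int) × (Int × Int × Int)) (j : Nat) =>
          if correct_ans.getD j 0 = 2 then
            if obs.getD j 0 = 1 then
              ((st.1.1 + 1, st.1.2.1, st.1.2.2), st.2)
            else
              (st.1, (st.2.1 + 1, st.2.2.1, st.2.2.2))
          else if correct_ans.getD j 0 = 1 then
            if obs.getD j 0 = 1 then
              ((st.1.1, st.1.2.1 + 1, st.1.2.2), st.2)
            else
              (st.1, (st.2.1, st.2.2.1 + 1, st.2.2.2))
          else if correct_ans.getD j 0 = 0 then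
            if obs.getD j 0 = 1 then
              ((st.1.1, st.1.2.1, st.1.2.2 + 1), st.2)
            else
              (st.1, (st.2.1, st.2.2.1, st.2.2.2 + 1))
          else st) st).1 =
      (st.1.1 + (L.countP (catHit correct_ans obs 2) : Int),
       st.1.2.1 + (L.countP (catHit correct_ans obs 1) : Int),
       st.1.2.2 + (L.countP (catHit correct_ans obs 0) : Int)) := by
  induction L with
  | nil => intro st; simp
  | cons j L ih =>
    intro st
    rw [List.foldl_cons, ih]
    simp only [List.countP_cons]
    by_cases hc2 : correct_ans.getD j 0 = 2
    · by_cases ho : obs.getD j 0 = 1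
      · rw [if_pos hc2, if_pos ho, catHit_cat_true _ _ _ _ hc2 ho,
          catHit_cat_false _ _ _ 1 (by omega), catHit_cat_false _ _ _ 0 (by omega)]
        refine Prod.ext ?_ (Prod.ext ?_ ?_) <;> simp <;> push_cast <;> ring
      · rw [if_pos hc2, if_neg ho, catHit_rew_false _ _ _ 2 ho,
          catHit_rew_false _ _ _ 1 ho, catHit_rew_false _ _ _ 0 ho]
        refine Prod.ext ?_ (Prod.ext ?_ ?_) <;> simp
    · by_cases hc1 : correct_ans.getD j 0 = 1
      · by_cases ho : obs.getD j 0 = 1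
        · rw [if_neg hc2, if_pos hc1, if_pos ho, catHit_cat_true _ _ _ _ hc1 ho,
            catHit_cat_false _ _ _ 2 (by omega), catHit_cat_false _ _ _ 0 (by omega)]
          refine Prod.ext ?_ (Prod.ext ?_ ?_) <;> simp <;> push_cast <;> ring
        · rw [if_neg hc2, if_pos hc1, if_neg ho, catHit_rew_false _ _ _ 2 ho,
            catHit_rew_false _ _ _ 1 ho, catHit_rew_false _ _ _ 0 ho]
          refine Prod.ext ?_ (Prod.ext ?_ ?_) <;> simp
      · by_cases hc0 : correct_ans.getD j 0 = 0
        · by_cases ho : obs.getD j 0 = 1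
          · rw [if_neg hc2, if_neg hc1, if_pos hc0, if_pos ho,
              catHit_cat_true _ _ _ _ hc0 ho, catHit_cat_false _ _ _ 2 (by omega),
              catHit_cat_false _ _ _ 1 (by omega)]
            refine Prod.ext ?_ (Prod.ext ?_ ?_) <;> simp <;> push_cast <;> ring
          · rw [if_neg hc2, if_neg hc1, if_pos hc0, if_neg ho,
              catHit_rew_false _ _ _ 2 ho, catHit_rew_false _ _ _ 1 ho,
              catHit_rew_false _ _ _ 0 ho]
            refine Prod.ext ?_ (Prod.ext ?_ ?_) <;> simp
        · rw [if_neg hc2, if_neg hc1, if_neg hc0,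
            catHit_cat_false _ _ _ 2 hc2, catHit_cat_false _ _ _ 1 hc1,
            catHit_cat_false _ _ _ 0 hc0]
          refine Prod.ext ?_ (Prod.ext ?_ ?_) <;> simp

-- zip as a map over the range of overlapping indices
theorem zip_eq_map_range (correct_ans obs : List Int) :
    correct_ans.zip obs =
      (List.range (min correct_ans.length obs.length)).map
        (fun j => (correct_ans.getD j 0, obs.getD j 0)) := by
  apply List.ext_getElem
  · simp [List.length_zip]
  · intro i h1 h2
    simp only [List.length_zip] at h1
    simp [List.getElem_zip, List.getD_eq_getElem?_getD,
      (by omega : i < correct_ans.length), (by omega : i < obs.length)]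

-- counting over the full index range equals counting over the overlapping range:
-- a trial past the end of obs reads default 0, which is never a reward.
theorem countP_range_trunc (correct_ans obs : List Int) (k : Int) :
    (List.range correct_ans.length).countP (catHit correct_ans obs k) =
    (List.range (min correct_ans.length obs.length)).countP (catHit correct_ans obs k) := by
  by_cases h : correct_ans.length ≤ obs.length
  · rw [min_eq_left h]
  · rw [min_eq_right (by omega)]
    have hsplit : correct_ans.length = obs.length + (correct_ans.length - obs.length) := by omega
    rw [hsplit, List.range_add, List.countP_append]
    have hz : ((List.range (correct_ans.length - obs.length)).map (obs.length + ·)).countP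
        (catHit correct_ans obs k) = 0 := by
      rw [List.countP_eq_zero]
      intro j hj
      simp only [List.mem_map, List.mem_range] at hj
      obtain ⟨i, _, rfl⟩ := hj
      have hd : obs.getD (obs.length + i) 0 = 0 := by
        rw [List.getD_eq_getElem?_getD, List.getElem?_eq_none (by omega)]; rfl
      simp [catHit, hd]
    omega

-- ===== VERDICT =====
theorem count_rewards_spec : Claim_equal_count_rewards := by
  unfold Claim_equal_count_rewards
  intro correct_ans obs trl_start _ _
  unfold Spec_count_rewards count_rewards count_rewards_alt
  -- B side: counts over the rewarded list = countP over the zip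
  simp only [PySem.List.count_eq, List.count_eq_countP, List.countP_map, List.countP_filter,
    PySem.List.slice_zero_start, PySem.List.slice_none_none, block_start]
  -- A side: fold over pyRange = fold over List.range with Nat index, with total getD indexing
  rw [PySem.List.pyRange_one]
  simp only [sub_zero, Int.toNat_natCast, List.foldl_map, zero_add, add_zero,
    PySem.List.pyGetD_natCast]
  obtain ⟨h2, h1, h0⟩ :
      _ ∧ _ ∧ _ := by
    have h := foldA_counts correct_ans obs (List.range correct_ans.length) ((0,0,0),(0,0,0))
    exact ⟨congrArg Prod.fst h, congrArg (fun t => t.2.1) h, congrArg (fun t => t.2.2) h⟩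
  rw [zip_eq_map_range correct_ans obs]
  simp only [List.countP_map]
  refine Prod.ext ?_ (Prod.ext ?_ ?_) <;>
    simp only [h2, h1, h0, countP_range_trunc, zero_add] <;> rfl
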